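-- pv_equiv track=rewrite | github.com/Cornflakes33/Assignment-3 | CUNR.py | count_unrooted_binary_trees
-- ===== SOURCE A (Python) =====
-- def count_unrooted_binary_trees(n):
--     if n % 2 == 0:
--         return 0
--
--     def catalan_number(n):
--         if n == 0:
--             return 1
--         c = [0] * (n + 1)
--         c[0] = 1
--         for i in range(1, n + 1):
--             c[i] = 0
--             for j in range(i):
--                 c[i] += c[j] * c[i - 1 - j]
--         return c[n]
--
--     return catalan_number((n - 1) // 2)
-- ===== SOURCE B (Python) =====
-- def count_unrooted_binary_trees(n):
--     if n % 2 == 0: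
--         return 0
--     k = (n - 1) // 2
--     b = 1
--     for i in range(1, k + 1):
--         b = b * (k + i) // i
--     return b // (k + 1)
-- ===== Notes on version B (the rewrite author's own statement) =====
-- stated objective: alternative
-- what changed: Replaces the dynamic-programming convolution for the Catalan number (nested loops over a table) by the closed-form binomial product C(2k,k)/(k+1) computed in one multiplicative pass; intended as faster (O(k) vs O(k^2) big-int operations; a local measurement saw ~580x at n=1024) but a timing run did not confirm it at the largest size, so no speed is claimed.
import Mathlib
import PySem

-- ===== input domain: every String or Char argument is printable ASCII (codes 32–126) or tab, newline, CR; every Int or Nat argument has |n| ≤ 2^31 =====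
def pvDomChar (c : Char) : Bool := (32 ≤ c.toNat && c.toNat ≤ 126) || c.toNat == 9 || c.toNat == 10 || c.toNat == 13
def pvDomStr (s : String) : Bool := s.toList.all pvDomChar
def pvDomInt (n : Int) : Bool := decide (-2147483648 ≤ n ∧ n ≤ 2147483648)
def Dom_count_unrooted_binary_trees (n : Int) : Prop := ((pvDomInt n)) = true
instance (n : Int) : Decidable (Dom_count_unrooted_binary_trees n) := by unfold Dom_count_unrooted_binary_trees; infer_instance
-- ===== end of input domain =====

-- B replaces A's dynamic-programming Catalan convolution (nested loops) by the closed-form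
-- binomial product C(2k,k)/(k+1) computed in a single multiplicative pass (different algorithm).

-- ===== PORT A =====
-- literal port of the nested DP: c = [0]*(k+1); c[0]=1; for i in 1..k: c[i] = sum_{j<i} c[j]*c[i-1-j]
def pvCatalanA (k : Nat) : Int :=
  if k = 0 then 1
  else
    ((List.range' 1 k).foldl
        (fun c i =>
          c.set i ((List.range i).foldl (fun s j => s + c.getD j 0 * c.getD (i - 1 - j) 0) 0))
        ((List.replicate (k + 1) (0 : Int)).set 0 1)).getD k 0

def count_unrooted_binary_trees (n : Int) : Int :=
  if n % 2 = 0 then 0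
  -- (n-1)//2: for odd n inside Pre_ we have n ≥ 1, so (n-1)/2 is nonneg and toNat is exact;
  -- for odd n < 0 Python A raises IndexError, excluded by Pre_.
  else pvCatalanA ((n - 1) / 2).toNat

-- ===== PORT B =====
def count_unrooted_binary_trees_alt (n : Int) : Int :=
  if n % 2 = 0 then 0
  else
    let k := PySem.Int.floordiv (n - 1) 2
    PySem.Int.floordiv
      ((PySem.List.pyRange 1 (k + 1)).foldl (fun b i => PySem.Int.floordiv (b * (k + i)) i) 1)
      (k + 1)

-- ===== PRECONDITION & SPEC =====
-- Pre_ excludes odd negative n, on which Python A raises IndexError ([0]*(k+1) is empty for k < 0).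
def Pre_count_unrooted_binary_trees (n : Int) : Prop := n % 2 = 0 ∨ 0 ≤ n
instance (n : Int) : Decidable (Pre_count_unrooted_binary_trees n) := by
  unfold Pre_count_unrooted_binary_trees; infer_instance
def pvWitness_count_unrooted_binary_trees : Int := (7)

def Spec_count_unrooted_binary_trees (n : Int) (out : Int) : Prop := out = count_unrooted_binary_trees_alt n
instance (n : Int) (out : Int) : Decidable (Spec_count_unrooted_binary_trees n out) := by unfold Spec_count_unrooted_binary_trees; infer_instance

-- ===== CLAIM (what is proved, stated in full; the proofs are below) =====
def Claim_equal_count_unrooted_binary_trees : Prop := ∀ (n : Int), Dom_count_unrooted_binary_trees n → Pre_count_unrooted_binary_trees n → Spec_count_unrooted_binary_trees n (count_unrooted_binary_trees n)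

-- ===== LEMMAS AND PROOFS =====

def pvCat (j : Nat) : Int := (catalan j : Int)

theorem pvFoldlAddSum (g : Nat → Int) (l : List Nat) (a : Int) :
    l.foldl (fun s j => s + g j) a = a + (l.map g).sum := by
  induction l generalizing a with
  | nil => simp
  | cons x xs ih => simp [ih, add_assoc]

theorem pvSumMapRange (g : Nat → Int) (n : Nat) :
    ((List.range n).map g).sum = ∑ j ∈ Finset.range n, g j := by
  induction n with
  | zero => simp
  | succ m ih => simp [List.range_succ, Finset.sum_range_succ, ih]

theorem pvCatSucc (m : Nat) :
    pvCat (m + 1) = ∑ j ∈ Finset.range (m + 1), pvCat j * pvCat (m - j) := by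
  simp only [pvCat, catalan_succ]
  push_cast
  exact Fin.sum_univ_eq_sum_range (fun x => ((catalan x : Int)) * ((catalan (m - x) : Int))) (m + 1)

-- DP invariant for port A's outer loop
theorem pvDpInv (k : Nat) : ∀ m, m ≤ k →
    (List.range' 1 m).foldl
        (fun c i =>
          c.set i ((List.range i).foldl (fun s j => s + c.getD j 0 * c.getD (i - 1 - j) 0) 0))
        ((1 : Int) :: List.replicate k 0)
      = (List.range (m + 1)).map pvCat ++ List.replicate (k - m) 0 := by
  intro m
  induction m with
  | zero =>
    intro _
    simp [List.range_succ, pvCat, catalan_zero]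
  | succ m ih =>
    intro hm
    have hm' : m ≤ k := Nat.le_of_succ_le hm
    rw [List.range'_concat, List.foldl_append, ih hm']
    have hlen : ((List.range (m + 1)).map pvCat).length = m + 1 := by simp
    set A := (List.range (m + 1)).map pvCat with hA
    -- reads: getD j 0 = pvCat j for j ≤ m
    have hget : ∀ j, j ≤ m → (A ++ List.replicate (k - m) 0).getD j 0 = pvCat j := by
      intro j hj
      have hj' : j < A.length := by omega
      rw [List.getD_eq_getElem?_getD, List.getElem?_append_left hj', hA]
      simp only [List.getElem?_map]
      rw [List.getElem?_range (by omega : j < m + 1)]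
      rfl
    have hidx : 1 + 1 * m = m + 1 := by omega
    simp only [List.foldl_cons, List.foldl_nil, hidx]
    -- inner sum computes pvCat (m+1)
    have hsum : (List.range (m + 1)).foldl
        (fun s j => s + (A ++ List.replicate (k - m) 0).getD j 0
          * (A ++ List.replicate (k - m) 0).getD (m + 1 - 1 - j) 0) 0
        = pvCat (m + 1) := by
      have hcong : (List.range (m + 1)).foldl
          (fun s j => s + (A ++ List.replicate (k - m) 0).getD j 0
            * (A ++ List.replicate (k - m) 0).getD (m + 1 - 1 - j) 0) 0
          = (List.range (m + 1)).foldl (fun s j => s + pvCat j * pvCat (m - j)) 0 := by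
        apply PySem.List.foldl_congr_mem
        intro s j hj
        have hj' : j ≤ m := by
          have := List.mem_range.mp hj; omega
        have h1 : m + 1 - 1 - j = m - j := by omega
        rw [h1, hget j hj', hget (m - j) (by omega)]
      rw [hcong, pvFoldlAddSum (fun j => pvCat j * pvCat (m - j)), pvSumMapRange,
        ← pvCatSucc]
      simp
    rw [hsum]
    -- the set at index m+1 lands on the head of the replicate tail
    have hk : k - m = (k - (m + 1)) + 1 := by omega
    rw [hk]
    rw [List.set_append]
    simp only [hlen, lt_irrefl, Nat.sub_self]
    rw [List.replicate_succ, List.set_cons_zero]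
    rw [show List.range (m + 1 + 1) = List.range (m + 1) ++ [m + 1] from List.range_succ]
    simp [hA]

theorem pvAEqCat (k : Nat) : pvCatalanA k = pvCat k := by
  unfold pvCatalanA
  by_cases hk : k = 0
  · simp [hk, pvCat, catalan_zero]
  · rw [if_neg hk]
    have hinit : (List.replicate (k + 1) (0 : Int)).set 0 1 = (1 : Int) :: List.replicate k 0 := by
      rw [List.replicate_succ, List.set_cons_zero]
    rw [hinit, pvDpInv k k le_rfl]
    simp only [Nat.sub_self, List.replicate_zero, List.append_nil]
    rw [List.getD_eq_getElem?_getD]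
    have hk' : k < (List.range (k + 1)).length := by simp
    simp

-- port B's product loop computes the binomial coefficient C(K+m, m)
theorem pvBLoop (K : Nat) : ∀ m : Nat,
    (PySem.List.pyRange 1 ((m : Int) + 1)).foldl
        (fun b i => PySem.Int.floordiv (b * ((K : Int) + i)) i) 1
      = (((K + m).choose m : Nat) : Int) := by
  intro m
  induction m with
  | zero => simp
  | succ m ih =>
    have hc : ((m + 1 : Nat) : Int) + 1 = ((m : Int) + 1) + 1 := by push_cast; ring
    rw [hc, PySem.List.pyRange_one_succ_right (by omega), List.foldl_append, ih]
    simp only [List.foldl_cons, List.foldl_nil]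
    have hnat : (K + m + 1) * (K + m).choose m = (K + m + 1).choose (m + 1) * (m + 1) := by
      have := Nat.add_one_mul_choose_eq (K + m) m
      omega
    rw [PySem.Int.floordiv_eq_ediv_of_pos (by omega : (0 : Int) < (m : Int) + 1)]
    have hmul : (((K + m).choose m : Nat) : Int) * ((K : Int) + ((m : Int) + 1))
        = (((K + (m + 1)).choose (m + 1) : Nat) : Int) * ((m : Int) + 1) := by
      have hz : (((K + m + 1) * (K + m).choose m : Nat) : Int)
          = (((K + m + 1).choose (m + 1) * (m + 1) : Nat) : Int) := by exact_mod_cast hnat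
      push_cast at hz
      linear_combination hz
    rw [hmul, Int.mul_ediv_cancel _ (by omega)]

theorem pvBEqCat (K : Nat) :
    PySem.Int.floordiv
        ((PySem.List.pyRange 1 ((K : Int) + 1)).foldl
          (fun b i => PySem.Int.floordiv (b * ((K : Int) + i)) i) 1)
        ((K : Int) + 1)
      = pvCat K := by
  rw [pvBLoop K K, PySem.Int.floordiv_eq_ediv_of_pos (by omega : (0 : Int) < (K : Int) + 1)]
  have h : (K + K).choose K = (K + 1) * catalan K := by
    rw [succ_mul_catalan_eq_centralBinom, Nat.centralBinom, two_mul]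
  rw [h]
  push_cast
  rw [mul_comm, Int.mul_ediv_cancel _ (by omega)]
  rfl

-- ===== VERDICT (by name: the statement is the Claim_ definition above) =====
theorem count_unrooted_binary_trees_spec : Claim_equal_count_unrooted_binary_trees := by
  intro n _ hpre
  unfold Spec_count_unrooted_binary_trees count_unrooted_binary_trees count_unrooted_binary_trees_alt
  by_cases h : n % 2 = 0
  · simp [h]
  · rw [if_neg h, if_neg h]
    have hn : 0 ≤ n := by
      rcases hpre with h0 | h1
      · exact absurd h0 h
      · exact h1
    have hnn : 0 ≤ (n - 1) / 2 := Int.ediv_nonneg (by omega) (by omega)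
    have hK : PySem.Int.floordiv (n - 1) 2 = ((((n - 1) / 2).toNat : Nat) : Int) := by
      rw [PySem.Int.floordiv_eq_ediv_of_pos (by omega : (0 : Int) < 2)]
      exact (Int.toNat_of_nonneg hnn).symm
    simp only [hK]
    rw [pvAEqCat, pvBEqCat]
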